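-- pv_equiv track=rewrite | github.com/Proctor81/DELTA-2.0 | interface/telegram_bot.py | _detect_genus_from_description
-- ===== SOURCE A (Python) =====
-- from typing import Any, Dict, Optional, Set, List, Tuple
--
-- _GENUS_KEYWORD_MAP: List[tuple] = [
--     (["bell pepper", "peperone", "pepper", "capsicum"],          "Bell_pepper"),
--     (["apple", "mela"],                                          "Apple"),
--     (["blueberry", "mirtillo"],                                  "Blueberry"),
--     (["cherry", "ciliegio", "ciliegia"],                         "Cherry"),
--     (["corn", "mais", "granturco", "granoturco"],                "Corn"),
--     (["grape", "uva", "vite", "vitis"],                          "Grape"),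
--     (["peach", "pesca", "pesco"],                                "Peach"),
--     (["potato", "patata"],                                       "Potato"),
--     (["squash", "zucca"],                                        "Squash"),
--     (["strawberry", "fragola"],                                  "Strawberry"),
--     (["tomato", "pomodoro"],                                     "Tomato"),
-- ]
--
-- def _detect_genus_from_description(description: str) -> Optional[str]:
--     """
--     Rileva programmaticamente il genere PlantVillage dalla descrizione dell'utente.
--     Restituisce il prefisso genere (es. 'Bell_pepper') o None se non trovato.
--     Ordine di priorità: prima match multi-parola, poi singola parola.
--     """
--     desc_lower = description.lower()
--     # Prima passa: cerca match multi-parola (es. "bell pepper" prima di "pepper")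
--     for keywords, genus in _GENUS_KEYWORD_MAP:
--         for kw in keywords:
--             if " " in kw and kw in desc_lower:
--                 return genus
--     # Seconda passa: match singola parola
--     for keywords, genus in _GENUS_KEYWORD_MAP:
--         for kw in keywords:
--             if " " not in kw and kw in desc_lower:
--                 return genus
--     return None
-- ===== SOURCE B (Python) =====
-- from typing import Optional, List, Tuple
--
-- _GENUS_KEYWORD_MAP: List[tuple] = [
--     (["bell pepper", "peperone", "pepper", "capsicum"],          "Bell_pepper"),
--     (["apple", "mela"],                                          "Apple"),
--     (["blueberry", "mirtillo"],                                  "Blueberry"),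
--     (["cherry", "ciliegio", "ciliegia"],                         "Cherry"),
--     (["corn", "mais", "granturco", "granoturco"],                "Corn"),
--     (["grape", "uva", "vite", "vitis"],                          "Grape"),
--     (["peach", "pesca", "pesco"],                                "Peach"),
--     (["potato", "patata"],                                       "Potato"),
--     (["squash", "zucca"],                                        "Squash"),
--     (["strawberry", "fragola"],                                  "Strawberry"),
--     (["tomato", "pomodoro"],                                     "Tomato"),
-- ]
--
-- # Every keyword gets a numeric priority rank: multi-word keywords occupy the low
-- # block (rank < 100000), single-word keywords the high block; within a block the
-- # rank encodes the (entry, keyword) position in the map.  Correctness: A returns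
-- # the keyword that is first in "multi-word pass then single-word pass" order,
-- # which is exactly the matched keyword of minimal rank.
-- _RANKED: List[Tuple[int, str, str]] = [
--     ((0 if " " in kw else 100000) + 100 * i + j, kw, genus)
--     for i, (keywords, genus) in enumerate(_GENUS_KEYWORD_MAP)
--     for j, kw in enumerate(keywords)
-- ]
--
-- def _detect_genus_from_description(description: str) -> Optional[str]:
--     desc_lower = description.lower()
--     matches = [(rank, genus) for rank, kw, genus in _RANKED if kw in desc_lower]
--     if not matches:
--         return None
--     return min(matches, key=lambda t: t[0])[1]
-- ===== Notes on version B (the rewrite author's own statement) =====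
-- stated objective: alternative
-- what changed: Instead of two early-return scanning passes over the keyword map, B assigns every keyword a numeric priority rank (multi-word block below single-word block), collects ALL matching keywords of the description in one filtering pass, and returns the genus of the argmin-rank match (None if no match).
import Mathlib
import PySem

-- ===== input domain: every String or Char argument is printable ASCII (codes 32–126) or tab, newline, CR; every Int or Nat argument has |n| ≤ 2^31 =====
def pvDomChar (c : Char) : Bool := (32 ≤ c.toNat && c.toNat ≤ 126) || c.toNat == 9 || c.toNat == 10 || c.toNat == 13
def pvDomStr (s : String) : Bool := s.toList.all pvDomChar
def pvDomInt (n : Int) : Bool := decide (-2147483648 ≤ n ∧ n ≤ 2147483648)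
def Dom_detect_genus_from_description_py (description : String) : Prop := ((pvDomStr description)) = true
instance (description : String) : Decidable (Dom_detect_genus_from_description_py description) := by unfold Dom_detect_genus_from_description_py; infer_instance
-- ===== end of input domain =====

-- B replaces A's two early-return scanning passes by one pass that collects all
-- matching keywords of a numerically rank-annotated table and selects the
-- argmin-rank match; objective: alternative (same output, different selection mechanism).


-- ===== PORT A =====
-- the shared module constant _GENUS_KEYWORD_MAP
def pvGenusMap : List (List String × String) :=
  [(["bell pepper", "peperone", "pepper", "capsicum"], "Bell_pepper"),
   (["apple", "mela"], "Apple"),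
   (["blueberry", "mirtillo"], "Blueberry"),
   (["cherry", "ciliegio", "ciliegia"], "Cherry"),
   (["corn", "mais", "granturco", "granoturco"], "Corn"),
   (["grape", "uva", "vite", "vitis"], "Grape"),
   (["peach", "pesca", "pesco"], "Peach"),
   (["potato", "patata"], "Potato"),
   (["squash", "zucca"], "Squash"),
   (["strawberry", "fragola"], "Strawberry"),
   (["tomato", "pomodoro"], "Tomato")]

-- inner loop of A's first pass: does some kw in the list contain a space and occur in d?
def pvInnerMulti : List String → String → Bool
  | [], _ => false
  | kw :: rest, d =>
    if PySem.Str.isIn " " kw && PySem.Str.isIn kw d then true else pvInnerMulti rest d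

-- outer loop of A's first pass
def pvOuterMulti : List (List String × String) → String → Option String
  | [], _ => none
  | (kws, genus) :: rest, d =>
    if pvInnerMulti kws d then some genus else pvOuterMulti rest d

-- inner loop of A's second pass (single-word keywords)
def pvInnerSingle : List String → String → Bool
  | [], _ => false
  | kw :: rest, d =>
    if !PySem.Str.isIn " " kw && PySem.Str.isIn kw d then true else pvInnerSingle rest d

-- outer loop of A's second pass
def pvOuterSingle : List (List String × String) → String → Option String
  | [], _ => none
  | (kws, genus) :: rest, d =>
    if pvInnerSingle kws d then some genus else pvOuterSingle rest d

def detect_genus_from_description_py (description : String) : Option String :=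
  let descLower := PySem.Str.lower description
  match pvOuterMulti pvGenusMap descLower with
  | some genus => some genus
  | none => pvOuterSingle pvGenusMap descLower

-- ===== PORT B =====
-- the module constant _RANKED: every keyword with its numeric priority rank
def pvRanked : List (Int × String × String) :=
  (PySem.List.enumerate pvGenusMap).flatMap (fun p =>
    (PySem.List.enumerate p.2.1).map (fun q =>
      ((if PySem.Str.isIn " " q.2 then 0 else 100000) + 100 * p.1 + q.1, q.2, p.2.2)))

def detect_genus_from_description_py_alt (description : String) : Option String :=
  let descLower := PySem.Str.lower description
  let ms := pvRanked.filterMap (fun t =>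
    if PySem.Str.isIn t.2.1 descLower then some (t.1, t.2.2) else none)
  match ms with
  | [] => none
  | _ :: _ =>
    match PySem.List.min? ms (fun t => t.1) with
    | some m => some m.2
    | none => none

-- ===== PRECONDITION & SPEC =====
def Spec_detect_genus_from_description_py (description : String) (out : Option String) : Prop := out = detect_genus_from_description_py_alt description
instance (description : String) (out : Option String) : Decidable (Spec_detect_genus_from_description_py description out) := by unfold Spec_detect_genus_from_description_py; infer_instance

-- ===== CLAIM (what is proved, stated in full; the proofs are below) =====
def Claim_equal_detect_genus_from_description_py : Prop := ∀ (description : String), Dom_detect_genus_from_description_py description → Spec_detect_genus_from_description_py description (detect_genus_from_description_py description)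

-- ===== LEMMAS AND PROOFS =====

-- the comprehension body of the old-style priority pair table, used only as proof scaffolding
def pvCollect (want : Bool) (m : List (List String × String)) : List (String × String) :=
  m.flatMap (fun p => (p.1.filter (fun kw => PySem.Str.isIn " " kw == want)).map (fun kw => (kw, p.2)))

-- first-match scan over a pair table (characterisation of A's two passes)
def pvScan : List (String × String) → String → Option String
  | [], _ => none
  | (kw, genus) :: rest, d =>
    if PySem.Str.isIn kw d then some genus else pvScan rest d

theorem pvCollect_cons (want : Bool) (kws : List String) (g : String)
    (rest : List (List String × String)) :
    pvCollect want ((kws, g) :: rest)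
      = (kws.filter (fun kw => PySem.Str.isIn " " kw == want)).map (fun kw => (kw, g))
        ++ pvCollect want rest := rfl

theorem pvScan_append (t1 t2 : List (String × String)) (d : String) :
    pvScan (t1 ++ t2) d = (pvScan t1 d).orElse (fun _ => pvScan t2 d) := by
  induction t1 with
  | nil => simp [pvScan]
  | cons p rest ih =>
    obtain ⟨kw, g⟩ := p
    simp only [List.cons_append, pvScan]
    split <;> simp [ih]

theorem pvScan_collect_one_multi (kws : List String) (g : String) (d : String) :
    pvScan ((kws.filter (fun kw => PySem.Str.isIn " " kw == true)).map (fun kw => (kw, g))) d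
      = (if pvInnerMulti kws d then some g else none) := by
  induction kws with
  | nil => simp [pvScan, pvInnerMulti]
  | cons kw rest ih =>
    cases hsp : PySem.Chars.isIn [' '] kw.toList with
    | true =>
      cases hin : PySem.Chars.isIn kw.toList d.toList with
      | true => simp [hsp, hin, pvScan, pvInnerMulti]
      | false => simp_all [pvScan, pvInnerMulti]
    | false => simp_all [pvInnerMulti]

theorem pvScan_collect_one_single (kws : List String) (g : String) (d : String) :
    pvScan ((kws.filter (fun kw => PySem.Str.isIn " " kw == false)).map (fun kw => (kw, g))) d
      = (if pvInnerSingle kws d then some g else none) := by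
  induction kws with
  | nil => simp [pvScan, pvInnerSingle]
  | cons kw rest ih =>
    cases hsp : PySem.Chars.isIn [' '] kw.toList with
    | true => simp_all [pvInnerSingle]
    | false =>
      cases hin : PySem.Chars.isIn kw.toList d.toList with
      | true => simp [hsp, hin, pvScan, pvInnerSingle]
      | false => simp_all [pvScan, pvInnerSingle]

theorem pvScan_collect_multi (m : List (List String × String)) (d : String) :
    pvScan (pvCollect true m) d = pvOuterMulti m d := by
  induction m with
  | nil => simp [pvCollect, pvScan, pvOuterMulti]
  | cons p rest ih =>
    obtain ⟨kws, g⟩ := p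
    rw [pvCollect_cons, pvScan_append, pvScan_collect_one_multi, ih]
    simp only [pvOuterMulti]
    split <;> simp [Option.orElse]

theorem pvScan_collect_single (m : List (List String × String)) (d : String) :
    pvScan (pvCollect false m) d = pvOuterSingle m d := by
  induction m with
  | nil => simp [pvCollect, pvScan, pvOuterSingle]
  | cons p rest ih =>
    obtain ⟨kws, g⟩ := p
    rw [pvCollect_cons, pvScan_append, pvScan_collect_one_single, ih]
    simp only [pvOuterSingle]
    split <;> simp [Option.orElse]

-- A equals the first-match scan of the priority pair table
theorem pvA_eq_scan (d : String) :
    detect_genus_from_description_py d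
      = pvScan (pvCollect true pvGenusMap ++ pvCollect false pvGenusMap) (PySem.Str.lower d) := by
  unfold detect_genus_from_description_py
  rw [pvScan_append, pvScan_collect_multi, pvScan_collect_single]
  cases h : pvOuterMulti pvGenusMap (PySem.Str.lower d) <;> simp [h, Option.orElse]

-- the priority pair table is exactly pvRanked with the ranks dropped (both closed terms)
theorem pvTable_eq :
    pvCollect true pvGenusMap ++ pvCollect false pvGenusMap
      = pvRanked.map (fun t => (t.2.1, t.2.2)) := by decide

-- filterMap with an if-guard is filter-then-map
theorem pvFilterMap_eq {a b : Type} (c : a → Bool) (f : a → b) (L : List a) :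
    L.filterMap (fun t => if c t then some (f t) else none) = (L.filter c).map f := by
  induction L with
  | nil => rfl
  | cons x l ih => cases h : c x <;> simp [h, ih]

-- scanning the rank-stripped table is taking the head of the filtered table
theorem pvScan_eq_head (L : List (Int × String × String)) (d : String) :
    pvScan (L.map (fun t => (t.2.1, t.2.2))) d
      = (L.filterMap (fun t =>
          if PySem.Str.isIn t.2.1 d then some (t.1, t.2.2) else none)).head?.map (fun m => m.2) := by
  rw [pvFilterMap_eq]
  induction L with
  | nil => rfl
  | cons t rest ih =>
    cases h : PySem.Str.isIn t.2.1 d with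
    | true =>
      simp only [List.map_cons, List.filter_cons, h, if_pos, pvScan, List.head?_cons,
        Option.map_some]
    | false =>
      simp only [List.map_cons, List.filter_cons, h, pvScan, Bool.false_eq_true, if_neg,
        not_false_iff, ih]

-- ranks of pvRanked are strictly increasing (closed computation)
theorem pvRanked_sorted :
    pvRanked.Pairwise (fun a b : Int × String × String => a.1 < b.1) := by decide

-- the filtered match list inherits the strict rank order
theorem pvMatches_sorted (d : String) :
    (pvRanked.filterMap (fun t =>
        if PySem.Str.isIn t.2.1 d then some (t.1, t.2.2) else none)).Pairwise
      (fun a b : Int × String => a.1 < b.1) := by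
  rw [pvFilterMap_eq]
  refine List.pairwise_map.mpr ?_
  exact (pvRanked_sorted.sublist List.filter_sublist).imp (fun h => h)

-- over a strictly rank-sorted nonempty list, the first extremal element is the head
theorem pvMin_sorted_head {L : List (Int × String)}
    (hs : L.Pairwise (fun a b : Int × String => a.1 < b.1)) (hne : L ≠ []) :
    PySem.List.min? L (fun t => t.1) = L.head? := by
  cases L with
  | nil => exact absurd rfl hne
  | cons h t =>
    rcases hm : PySem.List.min? (h :: t) (fun t : Int × String => t.1) with _ | m
    · rw [PySem.List.min?_eq_none_iff] at hm
      cases hm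
    · have hmem := PySem.List.min?_mem hm
      have hmin := PySem.List.min?_isMin hm
      rcases List.pairwise_cons.mp hs with ⟨h1, _⟩
      rcases List.mem_cons.mp hmem with he | ht
      · simp [he]
      · have hlt : h.1 < m.1 := h1 m ht
        have hle : m.1 ≤ h.1 := hmin h (List.mem_cons_self)
        omega

-- ===== VERDICT (by name: the statement is the Claim_ definition above) =====
theorem detect_genus_from_description_py_spec : Claim_equal_detect_genus_from_description_py := by
  intro d _
  unfold Spec_detect_genus_from_description_py
  rw [pvA_eq_scan, pvTable_eq, pvScan_eq_head]
  unfold detect_genus_from_description_py_alt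
  simp only []
  cases hM : pvRanked.filterMap (fun t =>
      if PySem.Str.isIn t.2.1 (PySem.Str.lower d) then some (t.1, t.2.2) else none) with
  | nil => rfl
  | cons m0 mt =>
    have hs := pvMatches_sorted (PySem.Str.lower d)
    rw [hM] at hs
    rw [pvMin_sorted_head hs (by simp)]
    rfl
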